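-- pv_equiv track=rewrite | github.com/justin-ardini/adventofcode2023 | day22.py | maybe_fall
-- ===== SOURCE A (Python) =====
-- def all_free(i, z_offset, brick, bricks, grid):
--   x_min = min(brick[0][0], brick[1][0])
--   x_max = max(brick[0][0], brick[1][0])
--   y_min = min(brick[0][1], brick[1][1])
--   y_max = max(brick[0][1], brick[1][1])
--   z_min = min(brick[0][2], brick[1][2])
--   for x in range(x_min, x_max + 1):
--     for y in range(y_min, y_max + 1):
--       if (x, y, z_min - z_offset) in grid:
--         return False
--   return True
--
-- def maybe_fall(i, bricks, grid):
--   brick = bricks[i]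
--   z_min = min(brick[0][2], brick[1][2])
--   if z_min == 1:
--     return brick, False
--   new_brick = brick[0][:], brick[1][:]
--   fell = False
--   for z_offset in range(1, z_min):
--     if all_free(i, z_offset, brick, bricks, grid):
--       fell = True
--       new_brick[0][2] -= 1
--       new_brick[1][2] -= 1
--     else:
--       break
--   return new_brick, fell
-- ===== SOURCE B (Python) =====
-- def maybe_fall(i, bricks, grid):
--   e0, e1 = bricks[i]
--   z_min = min(e0[2], e1[2])
--   if z_min == 1:
--     return (e0, e1), False
--   # per-footprint-column maximal descent, then the brick falls by the minimum
--   drops = []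
--   for x in range(min(e0[0], e1[0]), max(e0[0], e1[0]) + 1):
--     for y in range(min(e0[1], e1[1]), max(e0[1], e1[1]) + 1):
--       d = 0
--       while d < z_min - 1 and (x, y, z_min - 1 - d) not in grid:
--         d += 1
--       drops.append(d)
--   fall = min(drops)
--   n0, n1 = e0[:], e1[:]
--   n0[2] -= fall
--   n1[2] -= fall
--   return (n0, n1), fall > 0
-- ===== Notes on version B (the rewrite author's own statement) =====
-- stated objective: alternative
-- what changed: Inverted the loop nesting: instead of lowering the whole brick one level at a time and rescanning the entire footprint at every level with an early break (A), B computes once, for each (x,y) column of the footprint, how many consecutive levels below are free, and drops the brick by the minimum of those per-column drops.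
import Mathlib
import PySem

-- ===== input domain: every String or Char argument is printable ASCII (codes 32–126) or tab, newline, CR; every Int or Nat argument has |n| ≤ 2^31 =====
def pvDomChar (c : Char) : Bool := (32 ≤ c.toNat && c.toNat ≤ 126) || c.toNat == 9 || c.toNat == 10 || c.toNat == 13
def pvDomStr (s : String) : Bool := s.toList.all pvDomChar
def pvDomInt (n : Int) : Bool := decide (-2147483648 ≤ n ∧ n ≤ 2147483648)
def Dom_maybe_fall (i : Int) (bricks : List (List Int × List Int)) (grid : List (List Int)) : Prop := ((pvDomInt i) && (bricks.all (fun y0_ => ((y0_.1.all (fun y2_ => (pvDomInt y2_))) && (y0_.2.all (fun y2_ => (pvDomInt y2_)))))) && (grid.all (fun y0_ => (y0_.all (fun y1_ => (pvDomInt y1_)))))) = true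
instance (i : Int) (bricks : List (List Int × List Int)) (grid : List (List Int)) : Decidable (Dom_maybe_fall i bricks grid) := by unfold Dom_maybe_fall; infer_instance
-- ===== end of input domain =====

-- B inverts the loop nesting: instead of lowering the whole brick one level at a time and rescanning
-- the footprint at each level (A), it computes each footprint column's maximal free descent once and
-- drops the brick by the minimum of those; objective: alternative decomposition, similar cost.

-- ===== PORT A =====
-- port of A's helper all_free (parameters i, bricks kept though unused, as in the Python)
def all_free (i z_offset : Int) (brick : List Int × List Int) (bricks : List (List Int × List Int)) (grid : List (List Int)) : Bool :=
  let x_min := min (PySem.List.pyGetD brick.1 0 0) (PySem.List.pyGetD brick.2 0 0)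
  let x_max := max (PySem.List.pyGetD brick.1 0 0) (PySem.List.pyGetD brick.2 0 0)
  let y_min := min (PySem.List.pyGetD brick.1 1 0) (PySem.List.pyGetD brick.2 1 0)
  let y_max := max (PySem.List.pyGetD brick.1 1 0) (PySem.List.pyGetD brick.2 1 0)
  let z_min := min (PySem.List.pyGetD brick.1 2 0) (PySem.List.pyGetD brick.2 2 0)
  -- 'for x … for y … if (x,y,z_min-z_offset) in grid: return False / return True'
  (PySem.List.pyRange x_min (x_max + 1) 1).all fun x =>
    (PySem.List.pyRange y_min (y_max + 1) 1).all fun y =>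
      !(decide ([x, y, z_min - z_offset] ∈ grid))

-- A's 'for z_offset in range(1, z_min): if all_free …: fell = True; decrement; else: break'
def fallLoopA (i : Int) (brick : List Int × List Int) (bricks : List (List Int × List Int)) (grid : List (List Int)) : List Int → ((List Int × List Int) × Bool) → ((List Int × List Int) × Bool)
  | [], st => st
  | z :: rest, (nb, fell) =>
    if all_free i z brick bricks grid then
      fallLoopA i brick bricks grid rest ((nb.1.modify 2 (· - 1), nb.2.modify 2 (· - 1)), true)
    else (nb, fell)

def maybe_fall (i : Int) (bricks : List (List Int × List Int)) (grid : List (List Int)) : (List Int × List Int) × Bool :=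
  let brick := (PySem.List.pyGet? bricks i).getD ([], [])
  let z_min := min (PySem.List.pyGetD brick.1 2 0) (PySem.List.pyGetD brick.2 2 0)
  if z_min = 1 then (brick, false)
  else
    fallLoopA i brick bricks grid (PySem.List.pyRange 1 z_min 1) ((brick.1, brick.2), false)

-- ===== PORT B =====
-- 'd = 0; while d < z_min - 1 and (x, y, z_min - 1 - d) not in grid: d += 1'
def colDrop (grid : List (List Int)) (x y z_min d : Int) : Int :=
  if d < z_min - 1 ∧ [x, y, z_min - 1 - d] ∉ grid then colDrop grid x y z_min (d + 1) else d
termination_by (z_min - 1 - d).toNat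
decreasing_by omega

def maybe_fall_alt (i : Int) (bricks : List (List Int × List Int)) (grid : List (List Int)) : (List Int × List Int) × Bool :=
  let brick := (PySem.List.pyGet? bricks i).getD ([], [])
  let e0 := brick.1
  let e1 := brick.2
  let z_min := min (PySem.List.pyGetD e0 2 0) (PySem.List.pyGetD e1 2 0)
  if z_min = 1 then ((e0, e1), false)
  else
    let drops := (PySem.List.pyRange (min (PySem.List.pyGetD e0 0 0) (PySem.List.pyGetD e1 0 0)) (max (PySem.List.pyGetD e0 0 0) (PySem.List.pyGetD e1 0 0) + 1) 1).flatMap fun x =>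
      (PySem.List.pyRange (min (PySem.List.pyGetD e0 1 0) (PySem.List.pyGetD e1 1 0)) (max (PySem.List.pyGetD e0 1 0) (PySem.List.pyGetD e1 1 0) + 1) 1).map fun y =>
        colDrop grid x y z_min 0
    let fall := ((PySem.List.min? drops fun v => v).getD 0)
    ((e0.modify 2 (· - fall), e1.modify 2 (· - fall)), decide (fall > 0))

-- ===== PRECONDITION & SPEC =====
-- Pre_ excludes exactly the inputs on which the Python raises: an index i out of range for bricks
-- (IndexError) or a selected endpoint list shorter than 3 (IndexError on [2]).
def Pre_maybe_fall (i : Int) (bricks : List (List Int × List Int)) (grid : List (List Int)) : Prop :=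
  (PySem.List.pyGet? bricks i).any (fun b => decide (3 ≤ b.1.length ∧ 3 ≤ b.2.length)) = true
instance (i : Int) (bricks : List (List Int × List Int)) (grid : List (List Int)) : Decidable (Pre_maybe_fall i bricks grid) := by unfold Pre_maybe_fall; infer_instance

def pvWitness_maybe_fall : Int × (List (List Int × List Int)) × List (List Int) :=
  (0, [([0, 0, 3], [0, 1, 3])], [[0, 0, 1]])

def Spec_maybe_fall (i : Int) (bricks : List (List Int × List Int)) (grid : List (List Int)) (out : (List Int × List Int) × Bool) : Prop := out = maybe_fall_alt i bricks grid
instance (i : Int) (bricks : List (List Int × List Int)) (grid : List (List Int)) (out : (List Int × List Int) × Bool) : Decidable (Spec_maybe_fall i bricks grid out) := by unfold Spec_maybe_fall; infer_instance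

-- ===== CLAIM (what is proved, stated in full; the proofs are below) =====
def Claim_equal_maybe_fall : Prop := ∀ (i : Int) (bricks : List (List Int × List Int)) (grid : List (List Int)), Dom_maybe_fall i bricks grid → Pre_maybe_fall i bricks grid → Spec_maybe_fall i bricks grid (maybe_fall i bricks grid)

-- ===== LEMMAS AND PROOFS =====

lemma modify2_modify2 (l : List Int) (f g : Int → Int) :
    (l.modify 2 f).modify 2 g = l.modify 2 (fun a => g (f a)) := by
  match l with
  | [] => rfl
  | [a] => rfl
  | [a, b] => rfl
  | a :: b :: c :: t => simp [List.modify]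

lemma modify2_id (l : List Int) : l.modify 2 (fun a => a) = l := by
  match l with
  | [] => rfl
  | [a] => rfl
  | [a, b] => rfl
  | a :: b :: c :: t => simp [List.modify]

-- characterization of A's descent loop
lemma loopA_char (i : Int) (brick : List Int × List Int) (bricks : List (List Int × List Int))
    (grid : List (List Int)) (l : List Int) (nb : List Int × List Int) (fell : Bool) :
    fallLoopA i brick bricks grid l (nb, fell) =
      ((nb.1.modify 2 (fun a => a - ((l.takeWhile (fun z => all_free i z brick bricks grid)).length : Int)),
        nb.2.modify 2 (fun a => a - ((l.takeWhile (fun z => all_free i z brick bricks grid)).length : Int))),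
       fell || decide (0 < (l.takeWhile (fun z => all_free i z brick bricks grid)).length)) := by
  induction l generalizing nb fell with
  | nil => simp [fallLoopA, modify2_id]
  | cons z rest ih =>
    by_cases hz : all_free i z brick bricks grid
    · rw [fallLoopA, if_pos hz, ih]
      simp only [List.takeWhile_cons, hz, if_pos, List.length_cons]
      rw [modify2_modify2, modify2_modify2]
      simp only [Prod.mk.injEq]
      refine ⟨⟨?_, ?_⟩, by simp⟩ <;> · congr 1; funext a; push_cast; ring
    · rw [fallLoopA, if_neg hz]
      simp [hz, modify2_id]

-- characterization of B's per-column while loop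
lemma colDrop_char (grid : List (List Int)) (x y z_min : Int) :
    ∀ (n : Nat) (d : Int), (z_min - 1 - d).toNat = n →
    colDrop grid x y z_min d =
      d + (((PySem.List.pyRange (d + 1) z_min 1).takeWhile
              (fun z => !(decide ([x, y, z_min - z] ∈ grid)))).length : Int) := by
  intro n
  induction n with
  | zero =>
    intro d hd
    rw [colDrop]
    have h1 : ¬ (d < z_min - 1) := by omega
    rw [if_neg (by tauto)]
    rw [PySem.List.pyRange_one_eq_nil (by omega)]
    simp
  | succ m ih =>
    intro d hd
    have hlt : d < z_min - 1 := by omega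
    rw [PySem.List.pyRange_one_cons (by omega), List.takeWhile_cons]
    have e : z_min - (d + 1) = z_min - 1 - d := by ring
    simp only [e]
    by_cases hg : [x, y, z_min - 1 - d] ∈ grid
    · rw [colDrop, if_neg (by simp [hg])]
      simp [hg]
    · rw [colDrop, if_pos ⟨hlt, hg⟩, ih (d + 1) (by omega)]
      simp [hg]
      push_cast
      ring

-- min of a nonempty constant-like / shifted list helpers
lemma foldl_min_eq (t : List Int) (x : Int) (h : ∀ v ∈ t, x ≤ v) : t.foldl min x = x := by
  induction t generalizing x with
  | nil => rfl
  | cons a t ih =>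
    simp only [List.foldl_cons]
    rw [min_eq_left (h a (by simp))]
    exact ih x (fun v hv => h v (by simp [hv]))

lemma min?_all_zero (ns : List Int) (hne : ns ≠ []) (h : ∀ v ∈ ns, v = 0) :
    (PySem.List.min? ns fun v => v) = some 0 := by
  match ns with
  | [] => exact absurd rfl hne
  | x :: t =>
    rw [PySem.List.min?_id_cons]
    rw [h x (by simp)]
    rw [foldl_min_eq t 0 (fun v hv => by rw [h v (by simp [hv])])]

lemma min?_mem_zero (ns : List Int) (h0 : (0 : Int) ∈ ns) (hpos : ∀ v ∈ ns, 0 ≤ v) :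
    (PySem.List.min? ns fun v => v) = some 0 := by
  cases hm : PySem.List.min? ns fun v => v with
  | none =>
    rw [PySem.List.min?_eq_none_iff] at hm
    subst hm; simp at h0
  | some m =>
    have h1 : m ≤ 0 := PySem.List.min?_isMin hm 0 h0
    have h2 : 0 ≤ m := hpos m (PySem.List.min?_mem hm)
    exact congrArg some (le_antisymm h1 h2)

lemma min?_map_add_one (ns : List Int) :
    (PySem.List.min? (ns.map (fun v => v + 1)) fun v => v) =
      (PySem.List.min? ns fun v => v).map (fun v => v + 1) := by
  match ns with
  | [] => rfl
  | x :: t =>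
    simp only [List.map_cons]
    rw [PySem.List.min?_id_cons, PySem.List.min?_id_cons]
    simp only [Option.map_some]
    congr 1
    induction t generalizing x with
    | nil => rfl
    | cons a t ih =>
      simp only [List.map_cons, List.foldl_cons]
      rw [← ih (min x a)]
      congr 1
      omega

-- the core lemma: the minimum over columns of per-column takeWhile lengths equals
-- the takeWhile length of the pointwise conjunction
lemma min_tw_gen (ps : List (Int → Bool)) (hne : ps ≠ []) (l : List Int) :
    (PySem.List.min? (ps.map fun p => ((l.takeWhile p).length : Int)) fun v => v) =
      some ((l.takeWhile (fun z => ps.all fun p => p z)).length : Int) := by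
  induction l with
  | nil =>
    simp only [List.takeWhile_nil, List.length_nil, Nat.cast_zero]
    exact min?_all_zero _ (by simpa using hne) (by simp)
  | cons z rest ih =>
    by_cases hz : ps.all (fun p => p z)
    · have hmap : (ps.map fun p => (((z :: rest).takeWhile p).length : Int)) =
          (ps.map fun p => ((rest.takeWhile p).length : Int)).map (fun v => v + 1) := by
        rw [List.map_map]
        apply List.map_congr_left
        intro p hp
        have : p z = true := by
          rw [List.all_eq_true] at hz; exact hz p hp
        simp [List.takeWhile_cons, this]
      rw [hmap, min?_map_add_one, ih]
      simp [List.takeWhile_cons, hz]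
    · have : ∃ p ∈ ps, p z = false := by
        rw [List.all_eq_true] at hz
        push_neg at hz
        obtain ⟨p, hp, hpz⟩ := hz
        exact ⟨p, hp, by simpa using hpz⟩
      obtain ⟨p0, hp0, hp0z⟩ := this
      have h0 : (0 : Int) ∈ (ps.map fun p => (((z :: rest).takeWhile p).length : Int)) := by
        rw [List.mem_map]
        exact ⟨p0, hp0, by simp [List.takeWhile_cons, hp0z]⟩
      rw [min?_mem_zero _ h0 (by intro v hv; rw [List.mem_map] at hv; obtain ⟨p, _, rfl⟩ := hv; positivity)]
      simp [List.takeWhile_cons, hz]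

lemma pyRange_minmax_ne_nil (a b : Int) :
    PySem.List.pyRange (min a b) (max a b + 1) 1 ≠ [] := by
  rw [PySem.List.pyRange_one_cons (by omega)]
  simp

-- ===== VERDICT (by name: the statement is the Claim_ definition above) =====
theorem maybe_fall_spec : Claim_equal_maybe_fall := by
  intro i bricks grid _ _
  unfold Spec_maybe_fall
  simp only [maybe_fall, maybe_fall_alt]
  set brick := (PySem.List.pyGet? bricks i).getD ([], []) with hbrick
  set z_min := min (PySem.List.pyGetD brick.1 2 0) (PySem.List.pyGetD brick.2 2 0) with hzmin
  by_cases h1 : z_min = 1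
  · simp [h1]
  · rw [if_neg h1, if_neg h1]
    set a0 := PySem.List.pyGetD brick.1 0 0 with ha0
    set b0 := PySem.List.pyGetD brick.2 0 0 with hb0
    set a1 := PySem.List.pyGetD brick.1 1 0 with ha1
    set b1 := PySem.List.pyGetD brick.2 1 0 with hb1
    set xs := PySem.List.pyRange (min a0 b0) (max a0 b0 + 1) 1 with hxs
    set ys := PySem.List.pyRange (min a1 b1) (max a1 b1 + 1) 1 with hys
    set ps : List (Int → Bool) :=
      xs.flatMap (fun x => ys.map (fun y => fun z => !(decide ([x, y, z_min - z] ∈ grid)))) with hps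
    set L := PySem.List.pyRange 1 z_min 1 with hL
    have hxne : xs ≠ [] := pyRange_minmax_ne_nil a0 b0
    have hyne : ys ≠ [] := pyRange_minmax_ne_nil a1 b1
    have hne : ps ≠ [] := by
      rw [hps]
      cases hx : xs with
      | nil => exact absurd hx hxne
      | cons x xt =>
        cases hy : ys with
        | nil => exact absurd hy hyne
        | cons y yt => simp
    have hpredeq : (fun z => all_free i z brick bricks grid) = (fun z => ps.all fun p => p z) := by
      funext z
      simp only [all_free, hps, List.all_flatMap, List.all_map, Function.comp_def]
      rfl
    have hdrops : (xs.flatMap fun x => ys.map fun y => colDrop grid x y z_min 0)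
        = ps.map (fun p => ((L.takeWhile p).length : Int)) := by
      rw [hps, List.map_flatMap]
      congr 1
      funext x
      rw [List.map_map]
      apply List.map_congr_left
      intro y _
      have := colDrop_char grid x y z_min (z_min - 1 - 0).toNat 0 rfl
      simpa using this
    rw [hdrops, min_tw_gen ps hne L]
    rw [loopA_char, hpredeq]
    simp [Int.natCast_pos]
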